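-- pv_equiv track=rewrite | github.com/lry198010/SangerSequenceAnalysis | ABIFAutoAnalysis.py | getHighQualRegion
-- ===== SOURCE A (Python) =====
-- def getHighQualRegion(dRegion,nMaxVect):
--     nMaxVect += 1
--     res = dict()
--     for k,v in dRegion.items():
--         pos = -1
--         npos = 0
--         res[k] = [0,0]
--         for i in range(len(v)):
--             if v[i] > 0:
--                 if pos >=0:
--                     if res[k][1] < npos:
--                         res[k] = [pos,npos]
--                 npos = 0
--                 pos = -1
--             if v[i] == 0:
--                 if pos == -1:
--                     pos = i
--                 npos += 1
--         if pos >=0: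
--             if res[k][1] < npos:
--                 res[k] = [pos,npos]
--         npos = 0
--         for i in range(res[k][0] + res[k][1],len(v)):
--             npos += 1
--             if npos > nMaxVect:
--                 break
--             if v[i] == 0:
--                 res[k][1] += npos
--                 npos = 0
--         if npos <= nMaxVect:
--             res[k][1] += npos
--         res[k][1] = res[k][0] + res[k][1]
--         npos = 0
--         for i in range(res[k][0]-1,-1,-1):
--             npos += 1
--             if npos > nMaxVect:
--                 break
--             if v[i] == 0:
--                 res[k][0] = i
--                 npos = 0
--         if npos <= nMaxVect:
--             res[k][0] = 0
--     return res
-- ===== SOURCE B (Python) =====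
-- def getHighQualRegion(dRegion, nMaxVect):
--     m = nMaxVect + 1
--     res = dict()
--     for k, v in dRegion.items():
--         n = len(v)
--         # each zero position tagged with the number of positive entries before it;
--         # zeros sharing a tag lie in the same positive-delimited segment
--         tagged = []
--         c = 0
--         for i, x in enumerate(v):
--             if x > 0:
--                 c += 1
--             elif x == 0:
--                 tagged.append((i, c))
--         zeros = [z for z, _ in tagged]
--         # runs table: (first zero of segment, zero count of segment)
--         runs = []
--         for z, c in tagged:
--             if runs and runs[-1][2] == c:
--                 runs[-1][1] += 1
--             else:
--                 runs.append([z, 1, c])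
--         # earliest longest run (strict > keeps the first maximum)
--         best = (0, 0)
--         for st, ln, _ in runs:
--             if ln > best[1]:
--                 best = (st, ln)
--         s, e = best[0], best[0] + best[1]
--         # forward gap-extension over zero positions
--         last = e - 1
--         for z in zeros:
--             if z >= e:
--                 if z - last <= m:
--                     last = z
--                 else:
--                     break
--         e = last + 1
--         if n - e <= m:
--             e = n
--         # backward gap-extension over zero positions
--         last = s
--         for z in reversed(zeros):
--             if z < s:
--                 if last - z <= m:
--                     last = z
--                 else:
--                     break
--         s = 0 if last <= m else last
--         res[k] = [s, e]
--     return res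
-- ===== Notes on version B (the rewrite author's own statement) =====
-- stated objective: alternative
-- what changed: The sentinel-bookkeeping zero-run scan is replaced by a built runs table (zeros tagged with the count of positives before them, grouped into (start, count) runs, earliest longest selected), and both index-by-index gap-extension loops are replaced by scans over the extracted list of zero positions.
import Mathlib
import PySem

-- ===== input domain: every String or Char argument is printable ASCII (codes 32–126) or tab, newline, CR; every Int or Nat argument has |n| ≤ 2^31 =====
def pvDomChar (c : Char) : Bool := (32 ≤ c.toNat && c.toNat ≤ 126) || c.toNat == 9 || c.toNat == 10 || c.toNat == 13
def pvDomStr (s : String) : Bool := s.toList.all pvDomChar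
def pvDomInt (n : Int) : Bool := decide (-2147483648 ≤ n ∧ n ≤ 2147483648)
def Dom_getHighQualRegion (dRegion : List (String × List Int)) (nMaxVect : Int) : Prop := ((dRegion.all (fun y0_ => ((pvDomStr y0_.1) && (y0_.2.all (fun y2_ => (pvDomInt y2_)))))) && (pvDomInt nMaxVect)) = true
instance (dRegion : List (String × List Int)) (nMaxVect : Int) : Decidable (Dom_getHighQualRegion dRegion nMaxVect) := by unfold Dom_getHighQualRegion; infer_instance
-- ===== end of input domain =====

-- B replaces A's sentinel-bookkeeping zero-run scan by a tagged runs table (zeros keyed by the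
-- count of positives before them) and replaces both index-by-index gap-extension loops by scans
-- over the list of zero positions; same result, similar cost (objective: alternative).


-- ===== PORT A =====
-- first scan: state (pos, npos, res[k]) over the enumerated vector
def pvScanA : List (Int × Int) → Int → Int → (Int × Int) → Int × Int × (Int × Int)
  | [], pos, npos, best => (pos, npos, best)
  | (i, x) :: t, pos, npos, best =>
    if x > 0 then
      pvScanA t (-1) 0 (if pos ≥ 0 then (if best.2 < npos then (pos, npos) else best) else best)
    else if x == 0 then
      pvScanA t (if pos == -1 then i else pos) (npos + 1) best
    else pvScanA t pos npos best

-- forward extension loop over v[res[k][0]+res[k][1]:]; trailing `npos <= nMaxVect` add in the base case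
def pvFwdA : List Int → Int → Int → Int → Int
  | [], m, npos, acc => if npos ≤ m then acc + npos else acc
  | x :: t, m, npos, acc =>
    if npos + 1 > m then acc
    else if x == 0 then pvFwdA t m 0 (acc + (npos + 1)) else pvFwdA t m (npos + 1) acc

-- backward extension loop over indices res[k][0]-1 … 0 (reversed enumerated prefix);
-- trailing `npos <= nMaxVect` reset-to-0 in the base case
def pvBwdA : List (Int × Int) → Int → Int → Int → Int
  | [], m, npos, cur => if npos ≤ m then 0 else cur
  | (i, x) :: t, m, npos, cur =>
    if npos + 1 > m then cur
    else if x == 0 then pvBwdA t m 0 i else pvBwdA t m (npos + 1) cur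

def pvKeyA (v : List Int) (m : Int) : List Int :=
  let st := pvScanA (PySem.List.enumerate v 0) (-1) 0 (0, 0)
  let best := if st.1 ≥ 0 then (if st.2.2.2 < st.2.1 then (st.1, st.2.1) else st.2.2) else st.2.2
  let eLen := pvFwdA (v.drop (best.1 + best.2).toNat) m 0 best.2
  let s' := pvBwdA (((PySem.List.enumerate v 0).take best.1.toNat).reverse) m 0 best.1
  [s', best.1 + eLen]

def getHighQualRegion (dRegion : List (String × List Int)) (nMaxVect : Int) : List (String × List Int) :=
  let m := nMaxVect + 1
  (dRegion.foldl (fun res kv => res.insert kv.1 (pvKeyA kv.2 m)) (PySem.Dict.empty : PySem.Dict String (List Int))).items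

-- ===== PORT B =====
-- zeros tagged with the number of positive entries before them
def pvTagged : List (Int × Int) → Int → List (Int × Int)
  | [], _ => []
  | (i, x) :: t, c =>
    if x > 0 then pvTagged t (c + 1)
    else if x == 0 then (i, c) :: pvTagged t c
    else pvTagged t c

-- runs table builder (accumulator reversed: head is the python `runs[-1]`)
def pvRunsRev : List (Int × Int) → List (Int × Int × Int) → List (Int × Int × Int)
  | [], racc => racc
  | (z, c) :: t, racc =>
    match racc with
    | (st, ln, c') :: r =>
      if c' == c then pvRunsRev t ((st, ln + 1, c') :: r) else pvRunsRev t ((z, 1, c) :: (st, ln, c') :: r)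
    | [] => pvRunsRev t [(z, 1, c)]

def pvFwdB : List Int → Int → Int → Int → Int
  | [], _, _, last => last
  | z :: t, m, e, last =>
    if z ≥ e then (if z - last ≤ m then pvFwdB t m e z else last) else pvFwdB t m e last

def pvBwdB : List Int → Int → Int → Int → Int
  | [], _, _, last => last
  | z :: t, m, s, last =>
    if z < s then (if last - z ≤ m then pvBwdB t m s z else last) else pvBwdB t m s last

def pvKeyB (v : List Int) (m : Int) : List Int :=
  let n : Int := v.length
  let tagged := pvTagged (PySem.List.enumerate v 0) 0
  let zeros := tagged.map (·.1)
  let runs := (pvRunsRev tagged []).reverse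
  let best := runs.foldl (fun b r => if r.2.1 > b.2 then (r.1, r.2.1) else b) ((0 : Int), (0 : Int))
  let e1 := pvFwdB zeros m (best.1 + best.2) (best.1 + best.2 - 1) + 1
  let e2 := if n - e1 ≤ m then n else e1
  let last2 := pvBwdB zeros.reverse m best.1 best.1
  let s2 := if last2 ≤ m then 0 else last2
  [s2, e2]

def getHighQualRegion_alt (dRegion : List (String × List Int)) (nMaxVect : Int) : List (String × List Int) :=
  let m := nMaxVect + 1
  (dRegion.foldl (fun res kv => res.insert kv.1 (pvKeyB kv.2 m)) (PySem.Dict.empty : PySem.Dict String (List Int))).items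

-- ===== PRECONDITION & SPEC =====
def Spec_getHighQualRegion (dRegion : List (String × List Int)) (nMaxVect : Int) (out : List (String × List Int)) : Prop := out = getHighQualRegion_alt dRegion nMaxVect
instance (dRegion : List (String × List Int)) (nMaxVect : Int) (out : List (String × List Int)) : Decidable (Spec_getHighQualRegion dRegion nMaxVect out) := by unfold Spec_getHighQualRegion; infer_instance

-- ===== CLAIM (what is proved, stated in full; the proofs are below) =====
def Claim_equal_getHighQualRegion : Prop := ∀ (dRegion : List (String × List Int)) (nMaxVect : Int), Dom_getHighQualRegion dRegion nMaxVect → Spec_getHighQualRegion dRegion nMaxVect (getHighQualRegion dRegion nMaxVect)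

-- ===== LEMMAS AND PROOFS =====

-- runs of zeros (as (first zero, zero count) per positive-delimited segment), continued from
-- an open state (pos, npos)
def pvRunsFrom : List (Int × Int) → Int → Int → List (Int × Int)
  | [], pos, npos => if pos ≥ 0 then [(pos, npos)] else []
  | (i, x) :: t, pos, npos =>
    if x > 0 then (if pos ≥ 0 then [(pos, npos)] else []) ++ pvRunsFrom t (-1) 0
    else if x == 0 then pvRunsFrom t (if pos == -1 then i else pos) (npos + 1)
    else pvRunsFrom t pos npos

def pvSel (b r : Int × Int) : Int × Int := if b.2 < r.2 then r else b

-- zero positions of u, indexed from j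
def pvZIdx : List Int → Int → List Int
  | [], _ => []
  | x :: t, j => if x == 0 then j :: pvZIdx t (j + 1) else pvZIdx t (j + 1)

theorem pvScanA_runs (ps : List (Int × Int)) : ∀ (pos npos : Int) (best : Int × Int),
    (let st := pvScanA ps pos npos best
     if st.1 ≥ 0 then (if st.2.2.2 < st.2.1 then (st.1, st.2.1) else st.2.2) else st.2.2)
    = (pvRunsFrom ps pos npos).foldl pvSel best := by
  induction ps with
  | nil =>
    intro pos npos best
    simp only [pvScanA, pvRunsFrom]
    by_cases h : pos ≥ 0 <;> simp [h, pvSel]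
  | cons hd t ih =>
    obtain ⟨i, x⟩ := hd
    intro pos npos best
    simp only [pvScanA, pvRunsFrom]
    by_cases hx : x > 0
    · simp only [if_pos hx, List.foldl_append]
      rw [ih]
      by_cases h : pos ≥ 0 <;> simp [h, pvSel]
    · by_cases hz : x = 0
      · simp [hz, ih]
      · simp [hx, hz, ih]

theorem pvTagged_fst (v : List Int) : ∀ (j c : Int),
    (pvTagged (PySem.List.enumerate v j) c).map (·.1) = pvZIdx v j := by
  induction v with
  | nil => intro j c; simp [pvTagged, pvZIdx, PySem.List.enumerate_nil]
  | cons x t ih =>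
    intro j c
    rw [PySem.List.enumerate_cons]
    by_cases hx : x > 0
    · have hz : ¬ x = 0 := by omega
      simp only [pvTagged, pvZIdx]
      rw [if_pos hx, if_neg (by simpa using hz : ¬ (x == 0) = true)]
      exact ih (j + 1) (c + 1)
    · by_cases hz : x = 0
      · simp [pvTagged, pvZIdx, hz, ih]
      · simp [pvTagged, pvZIdx, hx, hz, ih]

def pvHeadLt (l : List (Int × Int × Int)) (c : Int) : Prop :=
  match l with
  | [] => True
  | r :: _ => r.2.2 < c

theorem pvRunsRev_spec (v : List Int) : ∀ (j c pos npos : Int) (racc : List (Int × Int × Int)),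
    0 ≤ j →
    ((pos = -1 ∧ npos = 0 ∧ pvHeadLt racc c) ∨
     (0 ≤ pos ∧ ∃ r2, racc = (pos, npos, c) :: r2 ∧ pvHeadLt r2 c)) →
    (pvRunsRev (pvTagged (PySem.List.enumerate v j) c) racc).reverse.map (fun r => (r.1, r.2.1))
      = (if 0 ≤ pos then racc.tail else racc).reverse.map (fun r => (r.1, r.2.1))
        ++ pvRunsFrom (PySem.List.enumerate v j) pos npos := by
  induction v with
  | nil =>
    intro j c pos npos racc _ hyp
    rcases hyp with ⟨hp, hn, _⟩ | ⟨hp, r2, hr, _⟩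
    · subst hp hn
      simp [PySem.List.enumerate_nil, pvTagged, pvRunsRev, pvRunsFrom]
    · subst hr
      simp [PySem.List.enumerate_nil, pvTagged, pvRunsRev, pvRunsFrom, hp]
  | cons x t ih =>
    intro j c pos npos racc hj hyp
    rw [PySem.List.enumerate_cons]
    by_cases hx : x > 0
    · simp only [pvTagged, if_pos hx]
      have hcl : pvHeadLt racc (c + 1) := by
        rcases hyp with ⟨_, _, h⟩ | ⟨_, r2, hr, h⟩
        · cases racc with
          | nil => trivial
          | cons r rt => exact lt_trans h (by omega)
        · subst hr; simp [pvHeadLt]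
      rw [ih (j + 1) (c + 1) (-1) 0 racc (by omega) (Or.inl ⟨rfl, rfl, hcl⟩)]
      simp only [pvRunsFrom, if_pos hx]
      rcases hyp with ⟨hp, hn, _⟩ | ⟨hp, r2, hr, _⟩
      · subst hp hn
        norm_num
      · subst hr
        simp [hp, List.map_append]
    · by_cases hz : x = 0
      · simp only [pvTagged]
        rw [if_neg hx, if_pos (by simpa using hz : (x == 0) = true)]
        simp only [pvRunsFrom]
        rw [if_neg hx, if_pos (by simpa using hz : (x == 0) = true)]
        rcases hyp with ⟨hp, hn, hh⟩ | ⟨hp, r2, hr, hh⟩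
        · subst hp hn
          rw [if_pos (by decide : ((-1 : Int) == -1) = true)]
          cases racc with
          | nil =>
            simp only [pvRunsRev]
            rw [ih (j + 1) c j 1 [(j, 1, c)] (by omega) (Or.inr ⟨hj, [], rfl, trivial⟩)]
            simp [hj]
          | cons r rt =>
            have hlt : r.2.2 < c := hh
            simp only [pvRunsRev]
            rw [if_neg (by simpa using (by omega : ¬ r.2.2 = c) : ¬ (r.2.2 == c) = true)]
            rw [ih (j + 1) c j 1 ((j, 1, c) :: r :: rt) (by omega) (Or.inr ⟨hj, r :: rt, rfl, hh⟩)]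
            simp [hj]
        · subst hr
          rw [if_neg (by simpa using (by omega : ¬ pos = -1) : ¬ (pos == -1) = true)]
          simp only [pvRunsRev]
          rw [if_pos (by simp : (c == c) = true)]
          rw [ih (j + 1) c pos (npos + 1) ((pos, npos + 1, c) :: r2) (by omega) (Or.inr ⟨hp, r2, rfl, hh⟩)]
          simp [hp]
      · simp only [pvTagged, pvRunsFrom]
        rw [if_neg hx, if_neg (by simpa using hz : ¬ (x == 0) = true),
            if_neg hx, if_neg (by simpa using hz : ¬ (x == 0) = true)]
        exact ih (j + 1) c pos npos racc (by omega) hyp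

theorem pvRunsFrom_bound (v : List Int) : ∀ (j pos npos : Int), 0 ≤ j →
    ((pos = -1 ∧ npos = 0) ∨ (0 ≤ pos ∧ 0 ≤ npos ∧ pos + npos ≤ j)) →
    ∀ r ∈ pvRunsFrom (PySem.List.enumerate v j) pos npos,
      0 ≤ r.1 ∧ 0 ≤ r.2 ∧ r.1 + r.2 ≤ j + v.length := by
  induction v with
  | nil =>
    intro j pos npos hj hyp r hr
    simp only [PySem.List.enumerate_nil, pvRunsFrom] at hr
    rcases hyp with ⟨hp, hn⟩ | ⟨hp, hn, hb⟩
    · rw [if_neg (by omega : ¬ pos ≥ 0)] at hr; exact absurd hr (by simp)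
    · rw [if_pos (by omega : pos ≥ 0)] at hr
      simp only [List.mem_singleton] at hr
      subst hr; simp; omega
  | cons x t ih =>
    intro j pos npos hj hyp r hr
    rw [PySem.List.enumerate_cons] at hr
    simp only [pvRunsFrom] at hr
    have hlen : (j : Int) + (x :: t).length = (j + 1) + t.length := by
      simp [List.length_cons]; omega
    rw [hlen]
    by_cases hx : x > 0
    · rw [if_pos hx] at hr
      rcases List.mem_append.mp hr with h1 | h1
      · rcases hyp with ⟨hp, hn⟩ | ⟨hp, hn, hb⟩
        · rw [if_neg (by omega : ¬ pos ≥ 0)] at h1; exact absurd h1 (by simp)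
        · rw [if_pos (by omega : pos ≥ 0)] at h1
          simp only [List.mem_singleton] at h1
          subst h1; refine ⟨hp, hn, ?_⟩; simp; omega
      · have := ih (j + 1) (-1) 0 (by omega) (Or.inl ⟨rfl, rfl⟩) r h1
        omega
    · by_cases hz : x = 0
      · rw [if_neg hx, if_pos (by simpa using hz : (x == 0) = true)] at hr
        rcases hyp with ⟨hp, hn⟩ | ⟨hp, hn, hb⟩
        · rw [if_pos (by simpa using hp : (pos == -1) = true)] at hr
          have := ih (j + 1) j (npos + 1) (by omega) (Or.inr ⟨hj, by omega, by omega⟩) r hr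
          omega
        · rw [if_neg (by simpa using (by omega : ¬ pos = -1) : ¬ (pos == -1) = true)] at hr
          have := ih (j + 1) pos (npos + 1) (by omega) (Or.inr ⟨hp, by omega, by omega⟩) r hr
          omega
      · rw [if_neg hx, if_neg (by simpa using hz : ¬ (x == 0) = true)] at hr
        have := ih (j + 1) pos npos (by omega) (by omega) r hr
        omega

theorem pvFoldlSel_pres (P : Int × Int → Prop) : ∀ (l : List (Int × Int)) (b : Int × Int),
    P b → (∀ r ∈ l, P r) → P (l.foldl pvSel b) := by
  intro l
  induction l with
  | nil => intro b hb _; exact hb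
  | cons r t ih =>
    intro b hb hall
    simp only [List.foldl_cons]
    apply ih
    · unfold pvSel; split
      · exact hall r (by simp)
      · exact hb
    · intro r' hr'; exact hall r' (by simp [hr'])

theorem pvFwdA_add (u : List Int) : ∀ (m npos acc : Int),
    pvFwdA u m npos acc = acc + pvFwdA u m npos 0 := by
  induction u with
  | nil => intro m npos acc; simp only [pvFwdA]; split <;> omega
  | cons x t ih =>
    intro m npos acc
    simp only [pvFwdA]
    split
    · omega
    · split
      · rw [ih m 0 (acc + (npos + 1)), ih m 0 (0 + (npos + 1))]; omega
      · exact ih m (npos + 1) acc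

theorem pvZIdx_mem (u : List Int) : ∀ (j z : Int), z ∈ pvZIdx u j → j ≤ z ∧ z < j + u.length := by
  induction u with
  | nil => intro j z h; exact absurd h (by simp [pvZIdx])
  | cons x t ih =>
    intro j z h
    simp only [pvZIdx] at h
    by_cases hz : x = 0
    · simp only [hz] at h
      simp only [List.length_cons]
      rcases List.mem_cons.mp (by simpa using h) with h1 | h1
      · omega
      · have := ih (j + 1) z h1; push_cast; push_cast at this; omega
    · simp [hz] at h
      have := ih (j + 1) z h
      simp only [List.length_cons]; push_cast; push_cast at this; omega

theorem pvZIdx_append (a b : List Int) : ∀ (j : Int),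
    pvZIdx (a ++ b) j = pvZIdx a j ++ pvZIdx b (j + a.length) := by
  induction a with
  | nil => intro j; simp [pvZIdx]
  | cons x t ih =>
    intro j
    simp only [List.cons_append, pvZIdx, ih, List.length_cons]
    have : j + 1 + (t.length : Int) = j + ((t.length : Int) + 1) := by omega
    rw [this]
    push_cast
    split <;> simp

theorem pvFwdB_skip (l r : List Int) (m e last : Int) (h : ∀ z ∈ l, ¬ (z ≥ e)) :
    pvFwdB (l ++ r) m e last = pvFwdB r m e last := by
  induction l with
  | nil => simp
  | cons z t ih =>
    simp only [List.cons_append, pvFwdB]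
    rw [if_neg (h z (by simp))]
    exact ih (fun z hz => h z (by simp [hz]))

theorem pvFwdB_stuck (l : List Int) (m e last : Int) (h : ∀ z ∈ l, z ≥ e ∧ m < z - last) :
    pvFwdB l m e last = last := by
  induction l with
  | nil => rfl
  | cons z t ih =>
    simp only [pvFwdB]
    have h1 := h z (by simp)
    rw [if_pos (by omega : z ≥ e), if_neg (by omega : ¬ z - last ≤ m)]

theorem pvFwd_main (u : List Int) : ∀ (j last m e : Int), e ≤ j → last < j →
    pvFwdA u m (j - 1 - last) 0 + last + 1
      = (if (j + u.length) - (pvFwdB (pvZIdx u j) m e last) - 1 ≤ m then (j + u.length)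
         else pvFwdB (pvZIdx u j) m e last + 1) := by
  induction u with
  | nil =>
    intro j last m e he hl
    simp only [pvZIdx, pvFwdB, pvFwdA, List.length_nil]
    split_ifs <;> omega
  | cons x t ih =>
    intro j last m e he hl
    simp only [pvFwdA]
    by_cases hnp : j - 1 - last + 1 > m
    · rw [if_pos hnp]
      have hstuck : pvFwdB (pvZIdx (x :: t) j) m e last = last := by
        apply pvFwdB_stuck
        intro z hz
        have := pvZIdx_mem (x :: t) j z hz
        constructor <;> omega
      rw [hstuck, if_neg (by simp only [List.length_cons]; push_cast; omega)]
      omega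
    · rw [if_neg hnp]
      by_cases hz : x = 0
      · rw [if_pos (by simpa using hz : (x == 0) = true)]
        simp only [pvZIdx]
        rw [if_pos (by simpa using hz : (x == 0) = true)]
        simp only [pvFwdB]
        rw [if_pos (by omega : j ≥ e), if_pos (by omega : j - last ≤ m)]
        rw [pvFwdA_add t m 0 (0 + (j - 1 - last + 1))]
        have hih := ih (j + 1) j m e (by omega) (by omega)
        rw [(by omega : j + 1 - 1 - j = (0 : Int))] at hih
        simp only [List.length_cons]
        have harith : (j : Int) + ((t.length : Int) + 1) = (j + 1) + t.length := by omega
        push_cast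
        rw [harith]
        omega
      · rw [if_neg (by simpa using hz : ¬ (x == 0) = true)]
        simp only [pvZIdx]
        rw [if_neg (by simpa using hz : ¬ (x == 0) = true)]
        have hih := ih (j + 1) last m e (by omega) (by omega)
        rw [(by omega : j + 1 - 1 - last = j - 1 - last + 1)] at hih
        simp only [List.length_cons]
        have harith : (j : Int) + ((t.length : Int) + 1) = (j + 1) + t.length := by omega
        push_cast
        rw [harith]
        omega

theorem pvBwdB_skip (l r : List Int) (m s last : Int) (h : ∀ z ∈ l, ¬ (z < s)) :
    pvBwdB (l ++ r) m s last = pvBwdB r m s last := by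
  induction l with
  | nil => simp
  | cons z t ih =>
    simp only [List.cons_append, pvBwdB]
    rw [if_neg (h z (by simp))]
    exact ih (fun z hz => h z (by simp [hz]))

theorem pvBwdB_stuck (l : List Int) (m s last : Int) (h : ∀ z ∈ l, z < s ∧ m < last - z) :
    pvBwdB l m s last = last := by
  induction l with
  | nil => rfl
  | cons z t ih =>
    simp only [pvBwdB]
    have h1 := h z (by simp)
    rw [if_pos (by omega : z < s), if_neg (by omega : ¬ last - z ≤ m)]

theorem pvBwd_main (v : List Int) : ∀ (k : Nat) (last m s : Int),
    k ≤ v.length → (k : Int) ≤ last → (k : Int) ≤ s →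
    pvBwdA (((PySem.List.enumerate v 0).take k).reverse) m (last - k) last
      = (if pvBwdB ((pvZIdx (v.take k) 0).reverse) m s last ≤ m then 0
         else pvBwdB ((pvZIdx (v.take k) 0).reverse) m s last) := by
  intro k
  induction k with
  | zero =>
    intro last m s _ _ _
    simp [pvBwdA, pvBwdB, pvZIdx]
  | succ k ih =>
    intro last m s hk hl hs
    have hklt : k < v.length := by omega
    have htA : ((PySem.List.enumerate v 0).take (k + 1)).reverse
        = ((k : Int), v[k]) :: ((PySem.List.enumerate v 0).take k).reverse := by
      rw [List.take_add_one]
      have : (PySem.List.enumerate v 0)[k]? = some ((k : Int), v[k]) := by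
        rw [PySem.List.getElem?_enumerate]
        simp [List.getElem?_eq_getElem hklt]
      simp [this]
    have htV : v.take (k + 1) = v.take k ++ [v[k]] := by
      rw [List.take_add_one, List.getElem?_eq_getElem hklt]; rfl
    have hzV : pvZIdx (v.take (k + 1)) 0
        = pvZIdx (v.take k) 0 ++ pvZIdx [v[k]] ((v.take k).length : Int) := by
      rw [htV, pvZIdx_append]; norm_num
    have hlen : ((v.take k).length : Int) = (k : Int) := by
      simp [List.length_take]; omega
    rw [htA]
    simp only [pvBwdA]
    by_cases hnp : last - (k + 1 : Nat) + 1 > m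
    · rw [if_pos hnp]
      have hstuck : pvBwdB ((pvZIdx (v.take (k + 1)) 0).reverse) m s last = last := by
        apply pvBwdB_stuck
        intro z hz
        rw [List.mem_reverse] at hz
        have := pvZIdx_mem (v.take (k + 1)) 0 z hz
        have hlen2 : ((v.take (k + 1)).length : Int) ≤ (k : Int) + 1 := by
          simp [List.length_take]
        push_cast at hnp hl hs this ⊢
        constructor <;> omega
      rw [hstuck, if_neg (by push_cast at hnp ⊢; omega)]
    · rw [if_neg hnp]
      by_cases hz : v[k] = 0
      · rw [if_pos (by simpa using hz : (v[k] == 0) = true)]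
        have hzz : pvZIdx (v.take (k + 1)) 0 = pvZIdx (v.take k) 0 ++ [(k : Int)] := by
          rw [hzV, hlen]
          simp only [pvZIdx]
          rw [if_pos (by simpa using hz : (v[k] == 0) = true)]
        rw [hzz, List.reverse_append]
        simp only [List.reverse_singleton, List.singleton_append, pvBwdB]
        rw [if_pos (by push_cast at hs ⊢; omega : (k : Int) < s),
            if_pos (by push_cast at hnp ⊢; omega : last - (k : Int) ≤ m)]
        have hih := ih (k : Int) m s (by omega) (by omega) (by omega)
        rw [(by omega : (k : Int) - (k : Nat) = 0)] at hih
        exact hih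
      · rw [if_neg (by simpa using hz : ¬ (v[k] == 0) = true)]
        have hzz : pvZIdx (v.take (k + 1)) 0 = pvZIdx (v.take k) 0 := by
          rw [hzV, hlen]
          simp only [pvZIdx]
          rw [if_neg (by simpa using hz : ¬ (v[k] == 0) = true)]
          simp
        rw [hzz]
        have hih := ih last m s (by omega) (by push_cast at hl ⊢; omega) (by push_cast at hs ⊢; omega)
        rw [(by push_cast; omega : last - ((k + 1 : Nat) : Int) + 1 = last - (k : Nat))]
        exact hih

theorem pvKey_eq (v : List Int) (m : Int) : pvKeyA v m = pvKeyB v m := by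
  have hflush := pvScanA_runs (PySem.List.enumerate v 0) (-1) 0 ((0:Int),(0:Int))
  have hzeros : (pvTagged (PySem.List.enumerate v 0) 0).map (·.1) = pvZIdx v 0 :=
    pvTagged_fst v 0 0
  have hruns : ((pvRunsRev (pvTagged (PySem.List.enumerate v 0) 0) []).reverse).map
      (fun r => (r.1, r.2.1)) = pvRunsFrom (PySem.List.enumerate v 0) (-1) 0 := by
    have h := pvRunsRev_spec v 0 0 (-1) 0 [] (le_refl 0) (Or.inl ⟨rfl, rfl, trivial⟩)
    simpa using h
  simp only [pvKeyA, pvKeyB]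
  rw [hflush, hzeros]
  rw [show ((pvRunsRev (pvTagged (PySem.List.enumerate v 0) 0) []).reverse).foldl
      (fun b r => if r.2.1 > b.2 then (r.1, r.2.1) else b) ((0:Int),(0:Int))
      = (pvRunsFrom (PySem.List.enumerate v 0) (-1) 0).foldl pvSel ((0:Int),(0:Int)) by
    rw [← hruns, List.foldl_map]; rfl]
  set B := (pvRunsFrom (PySem.List.enumerate v 0) (-1) 0).foldl pvSel ((0:Int),(0:Int)) with hB
  have hP : 0 ≤ B.1 ∧ 0 ≤ B.2 ∧ B.1 + B.2 ≤ (v.length : Int) := by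
    rw [hB]
    refine pvFoldlSel_pres (fun b => 0 ≤ b.1 ∧ 0 ≤ b.2 ∧ b.1 + b.2 ≤ (v.length : Int)) _ _ ⟨le_refl 0, le_refl 0, by simp⟩ ?_
    intro r hr
    have := pvRunsFrom_bound v 0 (-1) 0 (le_refl 0) (Or.inl ⟨rfl, rfl⟩) r hr
    simpa using this
  obtain ⟨hs0, hln0, hsn⟩ := hP
  have hsplit : ∀ k : Nat, k ≤ v.length →
      pvZIdx v 0 = pvZIdx (v.take k) 0 ++ pvZIdx (v.drop k) (k : Int) := by
    intro k hk
    conv_lhs => rw [← List.take_append_drop k v]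
    rw [pvZIdx_append]
    congr 2
    simp [List.length_take, Nat.min_eq_left hk]
  have h2 : B.1 + pvFwdA (List.drop (B.1 + B.2).toNat v) m 0 B.2
      = if (v.length : Int) - (pvFwdB (pvZIdx v 0) m (B.1 + B.2) (B.1 + B.2 - 1) + 1) ≤ m
        then (v.length : Int) else pvFwdB (pvZIdx v 0) m (B.1 + B.2) (B.1 + B.2 - 1) + 1 := by
    have hke : (B.1 + B.2).toNat ≤ v.length := by omega
    have hfsk : pvFwdB (pvZIdx v 0) m (B.1 + B.2) (B.1 + B.2 - 1)
        = pvFwdB (pvZIdx (v.drop (B.1 + B.2).toNat) ((B.1 + B.2).toNat : Int)) m (B.1 + B.2) (B.1 + B.2 - 1) := by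
      rw [hsplit (B.1 + B.2).toNat hke]
      apply pvFwdB_skip
      intro z hz
      have := pvZIdx_mem _ 0 z hz
      have hlt : ((v.take (B.1 + B.2).toNat).length : Int) = ((B.1 + B.2).toNat : Int) := by
        simp [List.length_take, Nat.min_eq_left hke]
      omega
    have hcast : (((B.1 + B.2).toNat : Int)) = B.1 + B.2 := by omega
    rw [hcast] at hfsk
    have hmain := pvFwd_main (v.drop (B.1 + B.2).toNat) (B.1 + B.2) (B.1 + B.2 - 1) m (B.1 + B.2)
      (le_refl _) (by omega)
    rw [(by omega : B.1 + B.2 - 1 - (B.1 + B.2 - 1) = (0:Int))] at hmain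
    have hlend : ((v.drop (B.1 + B.2).toNat).length : Int) = (v.length : Int) - (B.1 + B.2) := by
      simp [List.length_drop]; omega
    rw [hlend] at hmain
    rw [(by omega : B.1 + B.2 + ((v.length : Int) - (B.1 + B.2)) = (v.length : Int))] at hmain
    rw [pvFwdA_add, hfsk]
    split_ifs at hmain ⊢ <;> omega
  have h1 : pvBwdA (List.take B.1.toNat (PySem.List.enumerate v 0)).reverse m 0 B.1
      = if pvBwdB (pvZIdx v 0).reverse m B.1 B.1 ≤ m then 0
        else pvBwdB (pvZIdx v 0).reverse m B.1 B.1 := by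
    have hks : B.1.toNat ≤ v.length := by omega
    have hbsk : pvBwdB ((pvZIdx v 0).reverse) m B.1 B.1
        = pvBwdB ((pvZIdx (v.take B.1.toNat) 0).reverse) m B.1 B.1 := by
      rw [hsplit B.1.toNat hks, List.reverse_append]
      apply pvBwdB_skip
      intro z hz
      rw [List.mem_reverse] at hz
      have := pvZIdx_mem _ ((B.1.toNat : Int)) z hz
      omega
    have hbmain := pvBwd_main v B.1.toNat B.1 m B.1 hks (by omega) (by omega)
    rw [(by omega : B.1 - (B.1.toNat : Int) = 0)] at hbmain
    rw [hbsk]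
    exact hbmain
  rw [h1, h2]

-- ===== VERDICT (by name: the statement is the Claim_ definition above) =====
theorem getHighQualRegion_spec : Claim_equal_getHighQualRegion := by
  intro dRegion nMaxVect _
  unfold Spec_getHighQualRegion getHighQualRegion getHighQualRegion_alt
  have h : pvKeyA = pvKeyB := funext fun v => funext fun m => pvKey_eq v m
  rw [h]
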